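-- pv_equiv track=rewrite | github.com/stevepapazis/Project-Euler-Solutions | projeul_pr684.py | mod_S
-- ===== SOURCE A (Python) =====
-- modulo = 10**9+7
--
-- def mod_s(n):
--     return ( (n%9+1)*pow(10,n//9,modulo) - 1 ) % modulo
--
-- def mod_S(n):
--     k = n//9
--     r = n%9
--     return (
--             6 * pow(10,k,modulo)
--           - 9 * k
--           - 6
--           + sum([ mod_s(9*k+i) for i in range(r,0,-1) ])
--         ) % modulo
-- ===== SOURCE B (Python) =====
-- def mod_S(n):
--     modulo = 10**9 + 7
--     k, r = divmod(n, 9)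
--     return ((6 + r * (r + 3) // 2) * pow(10, k, modulo) - 9 * k - 6 - r) % modulo
-- ===== Notes on version B (the rewrite author's own statement) =====
-- stated objective: simpler
-- what changed: Replaces the per-residue loop summing mod_s(9k+i) values (and the mod_s helper itself) with a closed-form triangular-number expression in k and r, a single expression with no loop or helper call.
import Mathlib
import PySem

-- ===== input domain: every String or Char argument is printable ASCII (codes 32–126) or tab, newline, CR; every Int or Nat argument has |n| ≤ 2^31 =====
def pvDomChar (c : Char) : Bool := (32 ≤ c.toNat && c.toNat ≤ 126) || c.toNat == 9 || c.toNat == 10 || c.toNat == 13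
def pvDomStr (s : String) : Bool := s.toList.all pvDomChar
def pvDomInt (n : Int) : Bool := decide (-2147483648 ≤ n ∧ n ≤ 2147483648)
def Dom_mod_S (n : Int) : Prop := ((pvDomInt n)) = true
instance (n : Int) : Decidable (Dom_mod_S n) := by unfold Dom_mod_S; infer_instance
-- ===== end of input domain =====

-- B replaces A's short per-residue loop of mod_s calls by the closed-form triangular sum r*(r+3)//2, one expression, no helper.

-- Shared port of Python's built-in three-argument pow(10, k, modulo) (both A and B call it with the
-- same arguments). For k ≥ 0 it is PySem.Int.powMod; for k < 0 Python returns the modular inverse of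
-- 10^(-k) mod modulo, which (exactly, since modulo = 10^9+7 is prime and 10^e mod modulo ≠ 0) equals
-- (10^(-k) mod modulo)^(modulo-2) mod modulo, computed by binary exponentiation with reduction.
def pvPowModBin (b : Int) (e : Nat) (m : Int) : Int :=
  if h : e = 0 then PySem.Int.mod 1 m
  else
    let half := pvPowModBin b (e / 2) m
    let sq := PySem.Int.mod (half * half) m
    if e % 2 = 1 then PySem.Int.mod (sq * b) m else sq
decreasing_by exact Nat.div_lt_self (Nat.pos_of_ne_zero h) (by norm_num)

def pvPow10Mod (k : Int) : Int :=
  if 0 ≤ k then PySem.Int.powMod 10 k.toNat 1000000007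
  else pvPowModBin (PySem.Int.powMod 10 (-k).toNat 1000000007) 1000000005 1000000007

-- ===== PORT A =====
def pv_mod_s (n : Int) : Int :=
  PySem.Int.mod ((PySem.Int.mod n 9 + 1) * pvPow10Mod (PySem.Int.floordiv n 9) - 1) 1000000007

def mod_S (n : Int) : Int :=
  let k := PySem.Int.floordiv n 9
  let r := PySem.Int.mod n 9
  PySem.Int.mod
    (6 * pvPow10Mod k - 9 * k - 6
      + ((PySem.List.pyRange r 0 (-1)).map (fun i => pv_mod_s (9 * k + i))).sum)
    1000000007

-- ===== PORT B =====
def mod_S_alt (n : Int) : Int :=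
  let k := PySem.Int.floordiv n 9
  let r := PySem.Int.mod n 9
  PySem.Int.mod
    ((6 + PySem.Int.floordiv (r * (r + 3)) 2) * pvPow10Mod k - 9 * k - 6 - r)
    1000000007

-- ===== PRECONDITION & SPEC =====
def Spec_mod_S (n : Int) (out : Int) : Prop := out = mod_S_alt n
instance (n : Int) (out : Int) : Decidable (Spec_mod_S n out) := by unfold Spec_mod_S; infer_instance

-- ===== CLAIM (what is proved, stated in full; the proofs are below) =====
def Claim_equal_mod_S : Prop := ∀ (n : Int), Dom_mod_S n → Spec_mod_S n (mod_S n)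

-- ===== LEMMAS AND PROOFS =====

theorem pvRange0 : PySem.List.pyRange 0 0 (-1) = [] := by decide
theorem pvRange1 : PySem.List.pyRange 1 0 (-1) = [1] := by decide
theorem pvRange2 : PySem.List.pyRange 2 0 (-1) = [2, 1] := by decide
theorem pvRange3 : PySem.List.pyRange 3 0 (-1) = [3, 2, 1] := by decide
theorem pvRange4 : PySem.List.pyRange 4 0 (-1) = [4, 3, 2, 1] := by decide
theorem pvRange5 : PySem.List.pyRange 5 0 (-1) = [5, 4, 3, 2, 1] := by decide
theorem pvRange6 : PySem.List.pyRange 6 0 (-1) = [6, 5, 4, 3, 2, 1] := by decide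
theorem pvRange7 : PySem.List.pyRange 7 0 (-1) = [7, 6, 5, 4, 3, 2, 1] := by decide
theorem pvRange8 : PySem.List.pyRange 8 0 (-1) = [8, 7, 6, 5, 4, 3, 2, 1] := by decide

theorem pv_mod_s_term (k i : Int) (h1 : 1 ≤ i) (h2 : i < 9) :
    pv_mod_s (9 * k + i) = ((i + 1) * pvPow10Mod k - 1) % 1000000007 := by
  unfold pv_mod_s
  rw [PySem.Int.mod_eq_emod_of_pos (by norm_num : (0:Int) < 9),
      PySem.Int.mod_eq_emod_of_pos (by norm_num : (0:Int) < 1000000007),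
      PySem.Int.floordiv_eq_ediv_of_pos (by norm_num : (0:Int) < 9)]
  have hm : (9 * k + i) % 9 = i := by omega
  have hd : (9 * k + i) / 9 = k := by omega
  rw [hm, hd]

-- ===== VERDICT (by name: the statement is the Claim_ definition above) =====
theorem mod_S_spec : Claim_equal_mod_S := by
  intro n _
  show mod_S n = mod_S_alt n
  simp only [mod_S, mod_S_alt]
  have h9 : (0:Int) < 9 := by norm_num
  have hr0 : 0 ≤ PySem.Int.mod n 9 := PySem.Int.mod_nonneg n h9
  have hr9 : PySem.Int.mod n 9 < 9 := PySem.Int.mod_lt n h9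
  set k := PySem.Int.floordiv n 9 with hk
  set r := PySem.Int.mod n 9 with hrr
  clear_value k r
  rw [PySem.Int.mod_eq_emod_of_pos (by norm_num : (0:Int) < 1000000007),
      PySem.Int.mod_eq_emod_of_pos (by norm_num : (0:Int) < 1000000007),
      PySem.Int.floordiv_eq_ediv_of_pos (by norm_num : (0:Int) < 2)]
  set P := pvPow10Mod k with hP
  clear_value P
  interval_cases r <;>
    norm_num [pvRange0, pvRange1, pvRange2, pvRange3, pvRange4, pvRange5, pvRange6, pvRange7,
              pvRange8, pv_mod_s_term] <;>
    omega
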